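-- pv_equiv track=rewrite | github.com/DariiaBabii/First_repo | Module_5/sanitize.py | get_phone_numbers_for_countries
-- ===== SOURCE A (Python) =====
-- def sanitize_phone_number(phone):
--     new_phone = (
--         phone.strip()
--         .removeprefix("+")
--         .replace("(", "")
--         .replace(")", "")
--         .replace("-", "")
--         .replace(" ", "")
--     )
--     return new_phone
--
-- def get_phone_numbers_for_countries(list_phones):
--     phone_dict = {
--         'UA': [],
--         'JP': [],
--         'TW': [],
--         'SG': []
--     }
--
--     for phone in list_phones:
--         sanitized_phone = sanitize_phone_number(phone)
--         if sanitized_phone.startswith("81"):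
--             phone_dict['JP'].append(sanitized_phone)
--         elif sanitized_phone.startswith("65"):
--             phone_dict['SG'].append(sanitized_phone)
--         elif sanitized_phone.startswith("886"):
--             phone_dict['TW'].append(sanitized_phone)
--         elif sanitized_phone.startswith("380"):
--             phone_dict['UA'].append(sanitized_phone)
--         else:
--             # Якщо жоден із відомих кодів не зустрічається на початку номера
--             phone_dict['UA'].append(sanitized_phone)
--
--     return phone_dict
-- ===== SOURCE B (Python) =====
-- # Alternative: tag each phone once with its country via a prefix table, then
-- # build the result dict by a per-country filter comprehension.
--
-- _DROP = set("()- ")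
-- _PREFIX_TABLE = [("81", "JP"), ("65", "SG"), ("886", "TW"), ("380", "UA")]
-- _COUNTRIES = ["UA", "JP", "TW", "SG"]
--
--
-- def _sanitize(phone):
--     s = phone.strip()
--     if s.startswith("+"):
--         s = s[1:]
--     return "".join(c for c in s if c not in _DROP)
--
--
-- def _classify(s):
--     for prefix, country in _PREFIX_TABLE:
--         if s.startswith(prefix):
--             return country
--     return "UA"
--
--
-- def get_phone_numbers_for_countries(list_phones):
--     tagged = [(_classify(s), s) for s in map(_sanitize, list_phones)]
--     return {c: [s for k, s in tagged if k == c] for c in _COUNTRIES}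
-- ===== Notes on version B (the rewrite author's own statement) =====
-- stated objective: idiomatic
-- what changed: Replaces the branch-per-country dict-mutation loop with a data-driven prefix table: each phone is sanitized (one strip/prefix-drop/character-filter pass instead of four replace passes) and tagged with its country once, and the result dict is built by a per-country filter comprehension over the tagged list.
import Mathlib
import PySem

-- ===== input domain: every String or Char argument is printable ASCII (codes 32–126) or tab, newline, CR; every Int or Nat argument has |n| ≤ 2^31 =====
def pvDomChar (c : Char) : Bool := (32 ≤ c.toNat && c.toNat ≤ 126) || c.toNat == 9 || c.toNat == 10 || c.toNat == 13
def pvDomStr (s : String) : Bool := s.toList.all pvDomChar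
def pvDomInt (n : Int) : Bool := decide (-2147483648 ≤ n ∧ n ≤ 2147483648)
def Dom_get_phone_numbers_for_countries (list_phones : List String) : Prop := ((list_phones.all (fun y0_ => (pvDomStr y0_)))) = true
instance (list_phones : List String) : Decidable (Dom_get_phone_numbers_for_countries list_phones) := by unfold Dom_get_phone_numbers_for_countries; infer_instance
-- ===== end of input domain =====

-- B tags each sanitized phone once via a prefix table and builds the dict by per-country filters (idiomatic restructure; same cost).

-- ===== PORT A =====
def sanitize_phone_number (phone : String) : String :=
  let s1 := PySem.Str.strip phone
  -- removeprefix("+"): drops the prefix (one '+') iff present — exact port of str.removeprefix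
  let s2 := if PySem.Str.startswith s1 "+" then PySem.Str.slice s1 (some 1) none else s1
  let s3 := PySem.Str.replace s2 "(" ""
  let s4 := PySem.Str.replace s3 ")" ""
  let s5 := PySem.Str.replace s4 "-" ""
  PySem.Str.replace s5 " " ""

def get_phone_numbers_for_countries (list_phones : List String) : List (String × List String) :=
  let d0 : PySem.Dict String (List String) :=
    PySem.Dict.mk [("UA", []), ("JP", []), ("TW", []), ("SG", [])]
  let d := list_phones.foldl (fun d phone =>
    let s := sanitize_phone_number phone
    if PySem.Str.startswith s "81" then d.modify "JP" [] (· ++ [s])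
    else if PySem.Str.startswith s "65" then d.modify "SG" [] (· ++ [s])
    else if PySem.Str.startswith s "886" then d.modify "TW" [] (· ++ [s])
    else if PySem.Str.startswith s "380" then d.modify "UA" [] (· ++ [s])
    else d.modify "UA" [] (· ++ [s])) d0
  d.items

-- ===== PORT B =====
def pvSanitizeAlt (phone : String) : String :=
  let s := PySem.Str.strip phone
  let l := if PySem.Str.startswith s "+" then s.toList.drop 1 else s.toList
  -- "".join(c for c in s if c not in _DROP) — a character filter, exact on every string
  String.ofList (l.filter (fun c => !(['(', ')', '-', ' '].contains c)))

def pvClassifyAlt (s : String) : String :=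
  match [("81", "JP"), ("65", "SG"), ("886", "TW"), ("380", "UA")].find?
      (fun p => PySem.Str.startswith s p.1) with
  | some p => p.2
  | none => "UA"

def get_phone_numbers_for_countries_alt (list_phones : List String) : List (String × List String) :=
  let tagged := list_phones.map (fun p => let s := pvSanitizeAlt p; (pvClassifyAlt s, s))
  ["UA", "JP", "TW", "SG"].map (fun c => (c, (tagged.filter (fun t => t.1 == c)).map (·.2)))

-- ===== PRECONDITION & SPEC =====
def Spec_get_phone_numbers_for_countries (list_phones : List String) (out : List (String × List String)) : Prop := out = get_phone_numbers_for_countries_alt list_phones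
instance (list_phones : List String) (out : List (String × List String)) : Decidable (Spec_get_phone_numbers_for_countries list_phones out) := by unfold Spec_get_phone_numbers_for_countries; infer_instance

-- ===== CLAIM (what is proved, stated in full; the proofs are below) =====
def Claim_equal_get_phone_numbers_for_countries : Prop := ∀ (list_phones : List String), Dom_get_phone_numbers_for_countries list_phones → Spec_get_phone_numbers_for_countries list_phones (get_phone_numbers_for_countries list_phones)

-- ===== LEMMAS AND PROOFS =====

lemma replace_go_filter (c : Char) (fuel : Nat) (l acc : List Char) (h : l.length ≤ fuel) :
    PySem.Chars.replace.go [c] [] fuel l acc = acc.reverse ++ l.filter (fun x => x ≠ c) := by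
  induction fuel generalizing l acc with
  | zero =>
      have : l = [] := List.eq_nil_of_length_eq_zero (Nat.le_zero.mp h)
      subst this
      simp [PySem.Chars.replace.go]
  | succ fuel ih =>
      cases l with
      | nil => simp [PySem.Chars.replace.go]
      | cons x t =>
          rw [PySem.Chars.replace.go]
          by_cases hx : x = c
          · subst hx
            have hp : List.isPrefixOf [x] (x :: t) = true := by simp [List.isPrefixOf]
            have hd : List.drop [x].length (x :: t) = t := by simp
            simp only [hp, if_true, List.reverse_nil, List.nil_append, hd]
            rw [ih t acc (by simpa using Nat.succ_le_succ_iff.mp h)]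
            simp
          · have hp : List.isPrefixOf [c] (x :: t) = false := by
              simp [List.isPrefixOf]
              exact fun hh => absurd hh.symm hx
            simp only [hp, Bool.false_eq_true, if_false]
            rw [ih t (x :: acc) (by simpa using Nat.succ_le_succ_iff.mp h)]
            simp [hx]

lemma replace_single_empty (l : List Char) (c : Char) :
    PySem.Chars.replace l [c] [] = l.filter (fun x => x ≠ c) := by
  rw [PySem.Chars.replace]
  simp only [List.isEmpty_cons, Bool.false_eq_true, if_false]
  simpa using replace_go_filter c l.length l [] le_rfl

lemma replace_chain_filter (t : List Char) :
    PySem.Chars.replace (PySem.Chars.replace (PySem.Chars.replace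
        (PySem.Chars.replace t ['('] []) [')'] []) ['-'] []) [' '] []
      = t.filter (fun c => !(['(', ')', '-', ' '].contains c)) := by
  simp only [replace_single_empty, List.filter_filter]
  apply List.filter_congr
  intro x _
  by_cases h1 : x = '(' <;> by_cases h2 : x = ')' <;> by_cases h3 : x = '-' <;>
    by_cases h4 : x = ' ' <;> simp [h1, h2, h3, h4]

lemma sanitize_eq (p : String) : sanitize_phone_number p = pvSanitizeAlt p := by
  rw [← String.toList_inj]
  unfold sanitize_phone_number pvSanitizeAlt
  by_cases h : PySem.Str.startswith (PySem.Str.strip p) "+"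
  · simp only [h, if_true, PySem.Str.toList_replace, String.toList_ofList,
      PySem.Str.toList_slice, PySem.Chars.slice]
    rw [PySem.List.slice_from_one]
    rw [show (")" : String).toList = [')'] from rfl, show ("(" : String).toList = ['('] from rfl,
      show ("-" : String).toList = ['-'] from rfl, show (" " : String).toList = [' '] from rfl,
      show ("" : String).toList = [] from rfl]
    rw [replace_chain_filter]
    simp [List.drop_one]
  · simp only [h, Bool.false_eq_true, if_false, PySem.Str.toList_replace, String.toList_ofList]
    rw [show (")" : String).toList = [')'] from rfl, show ("(" : String).toList = ['('] from rfl,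
      show ("-" : String).toList = ['-'] from rfl, show (" " : String).toList = [' '] from rfl,
      show ("" : String).toList = [] from rfl]
    rw [replace_chain_filter]

lemma classify_cases (s : String) :
    pvClassifyAlt s = "JP" ∨ pvClassifyAlt s = "SG" ∨ pvClassifyAlt s = "TW" ∨ pvClassifyAlt s = "UA" := by
  unfold pvClassifyAlt
  simp only [List.find?, PySem.Str.startswith_eq]
  cases h1 : PySem.Chars.startswith s.toList ['8', '1'] <;>
    cases h2 : PySem.Chars.startswith s.toList ['6', '5'] <;>
      cases h3 : PySem.Chars.startswith s.toList ['8', '8', '6'] <;>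
        cases h4 : PySem.Chars.startswith s.toList ['3', '8', '0'] <;> simp [h1, h2, h3, h4]

lemma step_eq (d : PySem.Dict String (List String)) (phone : String) :
    (let s := sanitize_phone_number phone
     if PySem.Str.startswith s "81" then d.modify "JP" [] (· ++ [s])
     else if PySem.Str.startswith s "65" then d.modify "SG" [] (· ++ [s])
     else if PySem.Str.startswith s "886" then d.modify "TW" [] (· ++ [s])
     else if PySem.Str.startswith s "380" then d.modify "UA" [] (· ++ [s])
     else d.modify "UA" [] (· ++ [s]))
      = d.modify (pvClassifyAlt (pvSanitizeAlt phone)) [] (· ++ [pvSanitizeAlt phone]) := by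
  simp only [sanitize_eq]
  unfold pvClassifyAlt
  simp only [List.find?]
  cases h1 : PySem.Str.startswith (pvSanitizeAlt phone) "81" <;>
    cases h2 : PySem.Str.startswith (pvSanitizeAlt phone) "65" <;>
      cases h3 : PySem.Str.startswith (pvSanitizeAlt phone) "886" <;>
        cases h4 : PySem.Str.startswith (pvSanitizeAlt phone) "380" <;> simp

lemma loop_items (xs : List (String × String)) (ua jp tw sg : List String)
    (hx : ∀ t ∈ xs, t.1 = "JP" ∨ t.1 = "SG" ∨ t.1 = "TW" ∨ t.1 = "UA") :
    (xs.foldl (fun d t => d.modify t.1 [] (· ++ [t.2]))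
        (PySem.Dict.mk [("UA", ua), ("JP", jp), ("TW", tw), ("SG", sg)])).items
      = [("UA", ua ++ (xs.filter (fun t => t.1 == "UA")).map (·.2)),
         ("JP", jp ++ (xs.filter (fun t => t.1 == "JP")).map (·.2)),
         ("TW", tw ++ (xs.filter (fun t => t.1 == "TW")).map (·.2)),
         ("SG", sg ++ (xs.filter (fun t => t.1 == "SG")).map (·.2))] := by
  induction xs generalizing ua jp tw sg with
  | nil => simp
  | cons t rest ih =>
      obtain ⟨k, v⟩ := t
      simp only [List.foldl_cons]
      rcases hx (k, v) (by simp) with hk | hk | hk | hk <;> simp only at hk <;> subst hk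
      · have hm : (PySem.Dict.mk [("UA", ua), ("JP", jp), ("TW", tw), ("SG", sg)]).modify "JP" [] (· ++ [v])
            = PySem.Dict.mk [("UA", ua), ("JP", jp ++ [v]), ("TW", tw), ("SG", sg)] := by
          simp [PySem.Dict.modify, PySem.Dict.insert, PySem.Dict.getD, PySem.Dict.get?, PySem.Dict.contains]
        rw [hm, ih _ _ _ _ (fun t ht => hx t (List.mem_cons_of_mem _ ht))]
        simp
      · have hm : (PySem.Dict.mk [("UA", ua), ("JP", jp), ("TW", tw), ("SG", sg)]).modify "SG" [] (· ++ [v])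
            = PySem.Dict.mk [("UA", ua), ("JP", jp), ("TW", tw), ("SG", sg ++ [v])] := by
          simp [PySem.Dict.modify, PySem.Dict.insert, PySem.Dict.getD, PySem.Dict.get?, PySem.Dict.contains]
        rw [hm, ih _ _ _ _ (fun t ht => hx t (List.mem_cons_of_mem _ ht))]
        simp
      · have hm : (PySem.Dict.mk [("UA", ua), ("JP", jp), ("TW", tw), ("SG", sg)]).modify "TW" [] (· ++ [v])
            = PySem.Dict.mk [("UA", ua), ("JP", jp), ("TW", tw ++ [v]), ("SG", sg)] := by
          simp [PySem.Dict.modify, PySem.Dict.insert, PySem.Dict.getD, PySem.Dict.get?, PySem.Dict.contains]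
        rw [hm, ih _ _ _ _ (fun t ht => hx t (List.mem_cons_of_mem _ ht))]
        simp
      · have hm : (PySem.Dict.mk [("UA", ua), ("JP", jp), ("TW", tw), ("SG", sg)]).modify "UA" [] (· ++ [v])
            = PySem.Dict.mk [("UA", ua ++ [v]), ("JP", jp), ("TW", tw), ("SG", sg)] := by
          simp [PySem.Dict.modify, PySem.Dict.insert, PySem.Dict.getD, PySem.Dict.get?, PySem.Dict.contains]
        rw [hm, ih _ _ _ _ (fun t ht => hx t (List.mem_cons_of_mem _ ht))]
        simp

lemma foldl_tagged (lp : List String) (d0 : PySem.Dict String (List String)) :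
    lp.foldl (fun d phone =>
        d.modify (pvClassifyAlt (pvSanitizeAlt phone)) [] (· ++ [pvSanitizeAlt phone])) d0
      = (lp.map (fun p => (pvClassifyAlt (pvSanitizeAlt p), pvSanitizeAlt p))).foldl
          (fun d t => d.modify t.1 [] (· ++ [t.2])) d0 := by
  rw [List.foldl_map]

-- ===== VERDICT (by name: the statement is the Claim_ definition above) =====
theorem get_phone_numbers_for_countries_spec : Claim_equal_get_phone_numbers_for_countries := by
  intro list_phones _
  unfold Spec_get_phone_numbers_for_countries
  unfold get_phone_numbers_for_countries get_phone_numbers_for_countries_alt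
  simp only [step_eq]
  rw [foldl_tagged]
  have hmem : ∀ t ∈ (list_phones.map (fun p => (pvClassifyAlt (pvSanitizeAlt p), pvSanitizeAlt p))),
      t.1 = "JP" ∨ t.1 = "SG" ∨ t.1 = "TW" ∨ t.1 = "UA" := by
    intro t ht
    simp only [List.mem_map] at ht
    obtain ⟨p, _, hp⟩ := ht
    subst hp
    simpa using classify_cases (pvSanitizeAlt p)
  have hl := loop_items (list_phones.map (fun p => (pvClassifyAlt (pvSanitizeAlt p), pvSanitizeAlt p)))
    ([] : List String) ([] : List String) ([] : List String) ([] : List String) hmem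
  rw [hl]
  simp
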